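-- pv_equiv track=rewrite | github.com/rajatraina/chess-game | chess_game/opening_book.py | _validate_move_sequence_format
-- ===== SOURCE A (Python) =====
-- def _validate_move_sequence_format(moves_sequence: str) -> bool:
--     """
--     Validate that a move sequence follows the expected format.
--
--     Args:
--         moves_sequence: The move sequence to validate
--
--     Returns:
--         True if valid, False otherwise
--     """
--     if not moves_sequence:
--         return True  # Empty sequence is valid (starting position)
--
--     # Basic validation: should contain move numbers and moves
--     # Pattern: "1. e4 e5 2. Nf3 Nc6" or similar
--     parts = moves_sequence.split()
--
--     # Check for alternating move numbers and moves
--     for i, part in enumerate(parts):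
--         if i % 3 == 0:  # Should be move number (1., 2., etc.)
--             if not part.endswith('.'):
--                 return False
--         elif i % 3 == 1:  # Should be White's move
--             if not part or part.startswith('.'):
--                 return False
--         elif i % 3 == 2:  # Should be Black's move (optional)
--             if not part or part.startswith('.'):
--                 return False
--
--     return True
-- ===== SOURCE B (Python) =====
-- def _validate_move_sequence_format(moves_sequence: str) -> bool:
--     if not moves_sequence:
--         return True
--     parts = moves_sequence.split()
--     while parts:
--         if not parts[0].endswith('.'):
--             return False
--         for move in parts[1:3]:
--             if not move or move.startswith('.'):
--                 return False
--         parts = parts[3:]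
--     return True
-- ===== Notes on version B (the rewrite author's own statement) =====
-- stated objective: simpler
-- what changed: Replaces the i%3-dispatched indexed loop over enumerate() with chunked consumption: take one move-number token and up to two move tokens per round, validate the chunk, and recurse on the rest; no indices or modular arithmetic remain.
import Mathlib
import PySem

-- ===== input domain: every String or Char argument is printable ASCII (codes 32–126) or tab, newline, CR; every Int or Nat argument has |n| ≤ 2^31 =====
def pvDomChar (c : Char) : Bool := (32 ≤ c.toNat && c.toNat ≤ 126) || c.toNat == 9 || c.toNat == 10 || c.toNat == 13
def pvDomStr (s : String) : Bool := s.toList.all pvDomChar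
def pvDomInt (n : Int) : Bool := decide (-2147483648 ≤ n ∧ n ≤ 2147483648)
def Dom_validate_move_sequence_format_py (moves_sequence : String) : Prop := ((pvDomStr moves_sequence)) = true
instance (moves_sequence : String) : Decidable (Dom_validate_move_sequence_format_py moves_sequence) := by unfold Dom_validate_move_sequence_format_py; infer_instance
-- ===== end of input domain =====

-- B is simpler: chunked consumption (number token + up to two move tokens per round) instead of an
-- index-dispatched loop with i % 3; same return value on every input.

-- ===== PORT A =====
-- the enumerate-loop of A, early-returning False on the first bad token
def pvLoopA : List (Int × String) → Bool
  | [] => true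
  | (i, part) :: rest =>
    if PySem.Int.mod i 3 = 0 then
      if ¬ PySem.Str.endswith part "." then false else pvLoopA rest
    else if PySem.Int.mod i 3 = 1 then
      if part = "" ∨ PySem.Str.startswith part "." then false else pvLoopA rest
    else if PySem.Int.mod i 3 = 2 then
      if part = "" ∨ PySem.Str.startswith part "." then false else pvLoopA rest
    else pvLoopA rest

def validate_move_sequence_format_py (moves_sequence : String) : Bool :=
  if moves_sequence = "" then true
  else
    let parts := PySem.Str.split₀ moves_sequence
    pvLoopA (PySem.List.enumerate parts 0)

-- ===== PORT B =====
-- one inner-loop round: every token of parts[1:3] must be truthy and not start with '.'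
def pvGoodMove (m : String) : Bool := !(m = "" ∨ PySem.Str.startswith m ".")

-- the while-loop of B: consume a chunk of up to three tokens, recurse on parts[3:]
def pvLoopB : List String → Bool
  | [] => true
  | num :: rest =>
    if ¬ PySem.Str.endswith num "." then false
    else if (rest.take 2).all pvGoodMove then pvLoopB (rest.drop 2)
    else false
  termination_by l => l.length
  decreasing_by simp [List.length_drop]

def validate_move_sequence_format_py_alt (moves_sequence : String) : Bool :=
  if moves_sequence = "" then true
  else pvLoopB (PySem.Str.split₀ moves_sequence)

-- ===== PRECONDITION & SPEC =====
def Spec_validate_move_sequence_format_py (moves_sequence : String) (out : Bool) : Prop := out = validate_move_sequence_format_py_alt moves_sequence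
instance (moves_sequence : String) (out : Bool) : Decidable (Spec_validate_move_sequence_format_py moves_sequence out) := by unfold Spec_validate_move_sequence_format_py; infer_instance

-- ===== CLAIM (what is proved, stated in full; the proofs are below) =====
def Claim_equal_validate_move_sequence_format_py : Prop := ∀ (moves_sequence : String), Dom_validate_move_sequence_format_py moves_sequence → Spec_validate_move_sequence_format_py moves_sequence (validate_move_sequence_format_py moves_sequence)

-- ===== LEMMAS AND PROOFS =====

lemma pvLoopB_nil : pvLoopB [] = true := by rw [pvLoopB]

lemma pvLoopB_cons (num : String) (rest : List String) :
    pvLoopB (num :: rest) =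
      (if ¬ PySem.Str.endswith num "." then false
       else if (rest.take 2).all pvGoodMove then pvLoopB (rest.drop 2)
       else false) := by rw [pvLoopB]

lemma pvKey : ∀ (n : Nat) (parts : List String), parts.length ≤ n → ∀ k : Int,
    pvLoopA (PySem.List.enumerate parts (3 * k)) = pvLoopB parts := by
  intro n
  induction n with
  | zero =>
    intro parts h k
    have : parts = [] := List.eq_nil_of_length_eq_zero (Nat.le_zero.mp h)
    subst this; simp [PySem.List.enumerate, pvLoopA, pvLoopB_nil]
  | succ n ih =>
    intro parts h k
    have d0 : PySem.Int.mod (3 * k) 3 = 0 := by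
      rw [PySem.Int.mod_eq_emod_of_pos (by omega)]; omega
    have d1 : PySem.Int.mod (3 * k + 1) 3 = 1 := by
      rw [PySem.Int.mod_eq_emod_of_pos (by omega)]; omega
    have d2 : PySem.Int.mod (3 * k + 1 + 1) 3 = 2 := by
      rw [PySem.Int.mod_eq_emod_of_pos (by omega)]; omega
    match parts with
    | [] => simp [PySem.List.enumerate, pvLoopA, pvLoopB_nil]
    | [a] =>
      simp [PySem.List.enumerate_cons, PySem.List.enumerate_nil, pvLoopA, d0,
        pvLoopB_cons, pvLoopB_nil]
    | [a, b] =>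
      simp only [PySem.List.enumerate_cons, PySem.List.enumerate_nil, pvLoopA, d0, d1,
        pvLoopB_cons, pvLoopB_nil]
      by_cases ha : PySem.Str.endswith a "." = true <;>
      by_cases hb : (b = "" ∨ PySem.Str.startswith b "." = true) <;>
        simp [ha, hb, pvGoodMove, pvLoopA, pvLoopB_nil]
    | a :: b :: c :: rest =>
      have hrec : pvLoopA (PySem.List.enumerate rest (3 * (k + 1))) = pvLoopB rest := by
        apply ih; simp at h ⊢; omega
      have h3 : (3 : Int) * k + 1 + 1 + 1 = 3 * (k + 1) := by ring
      simp only [PySem.List.enumerate_cons, pvLoopA, d0, d1, d2, h3,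
        pvLoopB_cons]
      by_cases ha : PySem.Str.endswith a "." = true <;>
      by_cases hb : (b = "" ∨ PySem.Str.startswith b "." = true) <;>
      by_cases hc : (c = "" ∨ PySem.Str.startswith c "." = true) <;>
        simp [ha, hb, hc, pvGoodMove, pvLoopA, hrec, Bool.and_assoc]

-- ===== VERDICT (by name: the statement is the Claim_ definition above) =====
theorem validate_move_sequence_format_py_spec : Claim_equal_validate_move_sequence_format_py := by
  intro s _
  unfold Spec_validate_move_sequence_format_py validate_move_sequence_format_py validate_move_sequence_format_py_alt
  by_cases hs : s = ""
  · simp [hs]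
  · simp only [hs]
    have := pvKey (PySem.Str.split₀ s).length (PySem.Str.split₀ s) le_rfl 0
    simpa using this
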